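-- pv_equiv track=rewrite | github.com/okara83/Becoming-a-Data-Scientist | Data Science and Machine Learning/Machine-Learning-In-Python-THOROUGH/EXAMPLES/EDABIT/EXPERT/001_100/41_making_a_simple_dartboard.py | make_dartboard
-- ===== SOURCE A (Python) =====
-- def make_dartboard(n):
--
--     a, b, c, d = [], [], [], []
--
--     if n == 1:
--         return [1]
--
--     if n%2 == 0:
--         for i in range(1,n//2+2):
--             a.append([])
--             b.append([])
--             for j in range(1,i):
--                 a[i-2].append(str(j))
--         a, b = a[:-1], b[:-1]
--         for k in range(len(a)):
--             for i in range(n - 2*len(a[k]) ):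
--                 b[k].append(a[k][-1])
--             b[k] = a[k] + b[k] + a[k][::-1]
--         c = (b + b[::-1])
--
--     if n%2 !=0:
--         for i in range(1,n//2+3):
--             a.append([])
--             b.append([])
--             for j in range(1,i):
--                 a[i-2].append(str(j))
--         a, b = a[:-1], b[:-1]
--         for k in range(n//2):
--             for i in range(n - 2*len(a[k]) ):
--                 b[k].append(a[k][-1])
--             b[k] = a[k] + b[k] + a[k][::-1]
--         b[-1]=a[-1]+a[-2][::-1]
--         c = (b + b[::-1][1:])
--     for i in c:
--         d.append(int("".join(i)))
--     return (d)
-- ===== SOURCE B (Python) =====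
-- def make_dartboard(n):
--     # Each cell (i, j) of the n x n board is its "ring depth" min(i, j, n-1-i, n-1-j) + 1.
--     return [int("".join(str(min(i, j, n - 1 - i, n - 1 - j) + 1) for j in range(n)))
--             for i in range(n)]
-- ===== Notes on version B (the rewrite author's own statement) =====
-- stated objective: simpler
-- what changed: Replaces A's quadrant-build, pad-and-mirror construction (nested list surgery, slicing, reversals, separate even/odd branches) with a direct per-cell closed form: cell (i,j) is min(i,j,n-1-i,n-1-j)+1, computed in one comprehension over the whole grid.
import Mathlib
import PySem

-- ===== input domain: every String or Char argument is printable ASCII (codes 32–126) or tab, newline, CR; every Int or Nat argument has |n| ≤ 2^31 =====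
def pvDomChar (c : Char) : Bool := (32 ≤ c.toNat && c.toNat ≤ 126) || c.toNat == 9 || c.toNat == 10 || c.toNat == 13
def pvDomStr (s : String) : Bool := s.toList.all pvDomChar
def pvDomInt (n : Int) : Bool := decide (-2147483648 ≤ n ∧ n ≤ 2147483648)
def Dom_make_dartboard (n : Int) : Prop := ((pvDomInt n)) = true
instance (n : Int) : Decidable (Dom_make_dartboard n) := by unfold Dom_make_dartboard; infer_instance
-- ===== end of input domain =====

-- B replaces A's quadrant-build, pad-and-mirror list surgery with the per-cell closed form
-- min(i, j, n-1-i, n-1-j) + 1 computed directly over the whole grid (objective: simpler; same O(n^2)).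

-- ===== PORT A =====
def pyIntJoin (row : List String) : Int :=
  -- int("".join(row)); int() never fails here (each row joins to a nonempty digit string), so none ↦ 0 is unreachable
  match PySem.Int.ofStr? (PySem.Str.join "" row) with
  | some v => v
  | none => 0

def p1body (ab : List (List String) × List (List String)) (i : Int) :
    List (List String) × List (List String) :=
  let a := ab.1 ++ [[]]
  let b := ab.2 ++ [[]]
  let a := (PySem.List.pyRange 1 i 1).foldl
    (fun a j => PySem.List.pySetD a (i-2) (PySem.List.pyGetD a (i-2) [] ++ [PySem.Int.toStr j])) a
  (a, b)

def p2body (n : Int) (a : List (List String)) (b : List (List String)) (k : Int) :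
    List (List String) :=
  let b := (PySem.List.pyRange 0 (n - 2 * ((PySem.List.pyGetD a k []).length : Int)) 1).foldl
    (fun b _ => PySem.List.pySetD b k
      (PySem.List.pyGetD b k [] ++ [PySem.List.pyGetD (PySem.List.pyGetD a k []) (-1) ""])) b
  PySem.List.pySetD b k
    (PySem.List.pyGetD a k [] ++ PySem.List.pyGetD b k [] ++ (PySem.List.pyGetD a k []).reverse)

def make_dartboard (n : Int) : List Int :=
  if n == 1 then [1] else
  let c : List (List String) :=
    if PySem.Int.mod n 2 == 0 then
      let ab := (PySem.List.pyRange 1 (PySem.Int.floordiv n 2 + 2) 1).foldl p1body ([], [])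
      let a := PySem.List.slice ab.1 none (some (-1))
      let b := PySem.List.slice ab.2 none (some (-1))
      let b := (PySem.List.pyRange 0 (a.length : Int) 1).foldl (p2body n a) b
      b ++ b.reverse
    else
      let ab := (PySem.List.pyRange 1 (PySem.Int.floordiv n 2 + 3) 1).foldl p1body ([], [])
      let a := PySem.List.slice ab.1 none (some (-1))
      let b := PySem.List.slice ab.2 none (some (-1))
      let b := (PySem.List.pyRange 0 (PySem.Int.floordiv n 2) 1).foldl (p2body n a) b
      -- b[-1] = a[-1] + a[-2][::-1]  (pySetD: on the excluded negative odd n Python raises here)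
      let b := PySem.List.pySetD b (-1)
        (PySem.List.pyGetD a (-1) [] ++ (PySem.List.pyGetD a (-2) []).reverse)
      b ++ PySem.List.slice b.reverse (some 1) none
  c.foldl (fun d i => d ++ [pyIntJoin i]) []

-- ===== PORT B =====
def make_dartboard_alt (n : Int) : List Int :=
  (PySem.List.pyRange 0 n 1).map (fun i =>
    pyIntJoin ((PySem.List.pyRange 0 n 1).map (fun j =>
      PySem.Int.toStr (min (min i j) (min (n - 1 - i) (n - 1 - j)) + 1))))

-- ===== PRECONDITION & SPEC =====
-- Pre_ excludes exactly the negative odd n, on which A raises IndexError (the b[-1] assignment on an empty list).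
def Pre_make_dartboard (n : Int) : Prop := 0 ≤ n ∨ PySem.Int.mod n 2 = 0
instance (n : Int) : Decidable (Pre_make_dartboard n) := by unfold Pre_make_dartboard; infer_instance
def pvWitness_make_dartboard : Int := (5)

def Spec_make_dartboard (n : Int) (out : List Int) : Prop := out = make_dartboard_alt n
instance (n : Int) (out : List Int) : Decidable (Spec_make_dartboard n out) := by unfold Spec_make_dartboard; infer_instance

-- ===== CLAIM (what is proved, stated in full; the proofs are below) =====
def Claim_equal_make_dartboard : Prop := ∀ (n : Int), Dom_make_dartboard n → Pre_make_dartboard n → Spec_make_dartboard n (make_dartboard n)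

-- ===== LEMMAS AND PROOFS =====
-- helpers
theorem set_append_cons {α : Type} (xs ys : List α) (w v : α) :
    (xs ++ w :: ys).set xs.length v = xs ++ v :: ys := by
  induction xs with
  | nil => rfl
  | cons x xs ih => simp [List.set, ih]

theorem getD_append_cons {α : Type} (xs ys : List α) (w d : α) :
    (xs ++ w :: ys).getD xs.length d = w := by
  induction xs with
  | nil => rfl
  | cons x xs ih => simpa using ih

theorem getD_set_self {α : Type} (xs : List α) (i : Nat) (v d : α) (h : i < xs.length) :
    (xs.set i v).getD i d = v := by
  induction xs generalizing i with
  | nil => simp at h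
  | cons x xs ih =>
    cases i with
    | zero => rfl
    | succ i => simpa using ih i (by simpa using h)

theorem rev_map_range {α : Type} (f : Nat → α) (T : Nat) :
    (List.range T).map (fun t => f (T - 1 - t)) = ((List.range T).map f).reverse := by
  induction T with
  | zero => rfl
  | succ T ih =>
    conv_lhs => rw [List.range_succ_eq_map]
    conv_rhs => rw [List.range_succ]
    simp only [List.map_cons, List.map_append, List.map_map, List.reverse_append,
      List.reverse_cons, List.reverse_nil, List.nil_append, List.cons_append,
      Nat.add_sub_cancel, Nat.sub_zero]
    refine congrArg₂ _ rfl ?_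
    rw [← ih]
    exact List.map_congr_left (fun t _ => by simp only [Function.comp]; congr 1; omega)

-- strl t = ["1", "2", …, str t]
def strl (t : Nat) : List String := (List.range t).map (fun k : Nat => PySem.Int.toStr ((k : Int) + 1))

def rowMid (n : Int) (k : Nat) : List String :=
  strl (k+1) ++ List.replicate (n - 2*((k:Int)+1)).toNat (PySem.Int.toStr ((k:Int)+1)) ++ (strl (k+1)).reverse

-- the 'xs[idx].append(f(j))' loop: repeated pySetD at one fixed in-range index
theorem foldl_setD_append (js : List Int) (f : Int → String) (a : List (List String)) (idx : Nat)
    (h : idx < a.length) :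
    js.foldl (fun a j => PySem.List.pySetD a (idx:Int) (PySem.List.pyGetD a (idx:Int) [] ++ [f j])) a
      = a.set idx (a.getD idx [] ++ js.map f) := by
  induction js generalizing a with
  | nil =>
    simp only [List.foldl_nil, List.map_nil, List.append_nil]
    rw [List.getD_eq_getElem _ _ h, List.set_getElem_self]
  | cons j js ih =>
    rw [List.foldl_cons, ih _ (by simp [h]), PySem.List.pySetD_natCast, PySem.List.pyGetD_natCast,
      getD_set_self _ _ _ _ (by simpa using h), List.set_set]
    simp

theorem phase1 (N : Nat) :
    (PySem.List.pyRange 1 ((N:Int)+2) 1).foldl p1body ([], []) =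
      ((List.range N).map (fun k => strl (k+1)) ++ [[]], List.replicate (N+1) ([] : List String)) := by
  induction N with
  | zero => decide
  | succ N ih =>
    have h1 : ((N+1:Nat):Int) + 2 = ((N:Int)+2) + 1 := by push_cast; ring
    rw [h1, PySem.List.pyRange_one_succ_right (by omega), List.foldl_append, ih]
    simp only [List.foldl_cons, List.foldl_nil, p1body]
    have hidx : ((N:Int) + 2 - 2) = ((N:Nat):Int) := by push_cast; ring
    simp only [hidx]
    rw [foldl_setD_append _ _ _ N (by simp)]
    have hget : ((List.range N).map (fun k => strl (k+1)) ++ [[]] ++ [[]]).getD N ([] : List String) = [] := by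
      have h := getD_append_cons ((List.range N).map (fun k => strl (k+1))) [[]] ([] : List String) []
      simpa using h
    have hset : ∀ v : List String,
        ((List.range N).map (fun k => strl (k+1)) ++ [[]] ++ [[]]).set N v
          = (List.range N).map (fun k => strl (k+1)) ++ [v, []] := by
      intro v
      have h := set_append_cons ((List.range N).map (fun k => strl (k+1))) [[]] ([] : List String) v
      simpa using h
    rw [hget, hset]
    have hjs : (PySem.List.pyRange 1 ((N:Int)+2) 1).map PySem.Int.toStr = strl (N+1) := by
      rw [PySem.List.pyRange_one]
      have h2 : ((N:Int) + 2 - 1).toNat = N + 1 := by omega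
      rw [h2, List.map_map]
      unfold strl
      refine List.map_congr_left (fun k _ => ?_)
      simp only [Function.comp_apply]
      congr 1
      ring
    rw [hjs, List.range_succ, ← List.replicate_succ' (n := N+1)]
    simp

theorem phase2 (n : Int) (L m M : Nat) (hmL : m ≤ L) (hmM : m ≤ M) :
    (PySem.List.pyRange 0 (m:Int) 1).foldl
        (p2body n ((List.range L).map (fun k : Nat => strl (k+1))))
        (List.replicate M ([] : List String))
      = (List.range m).map (rowMid n) ++ List.replicate (M-m) [] := by
  induction m with
  | zero =>
    rw [show ((0:Nat):Int) = 0 from rfl, PySem.List.pyRange_one_eq_nil (by omega)]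
    simp
  | succ m ih =>
    have h1 : ((m+1:Nat):Int) = (m:Int) + 1 := by push_cast; ring
    rw [h1, PySem.List.pyRange_one_succ_right (by omega), List.foldl_append,
      ih (by omega) (by omega), List.foldl_cons, List.foldl_nil]
    set S : List (List String) := (List.range m).map (rowMid n) ++ List.replicate (M-m) [] with hS
    have hSlen : S.length = M := by simp [hS]; omega
    have hrep : List.replicate (M-m) ([] : List String) = [] :: List.replicate (M-m-1) [] := by
      rw [← List.replicate_succ]; congr 1; omega
    have hmapl : ((List.range m).map (rowMid n)).length = m := by simp
    have hSgetD : S.getD m [] = [] := by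
      rw [hS, hrep]
      have h := getD_append_cons ((List.range m).map (rowMid n)) (List.replicate (M-m-1) []) ([] : List String) []
      rw [hmapl] at h; exact h
    have hSset : ∀ v, S.set m v = (List.range m).map (rowMid n) ++ v :: List.replicate (M-m-1) [] := by
      intro v; rw [hS, hrep]
      have h := set_append_cons ((List.range m).map (rowMid n)) (List.replicate (M-m-1) []) ([] : List String) v
      rw [hmapl] at h; exact h
    have haget : PySem.List.pyGetD ((List.range L).map (fun k : Nat => strl (k+1))) ((m:Nat):Int) []
        = strl (m+1) := by
      rw [PySem.List.pyGetD_natCast, PySem.List.getD_map_range _ _ _ _ (by omega)]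
    have hlast : PySem.List.pyGetD (strl (m+1)) (-1) "" = PySem.Int.toStr ((m:Int)+1) := by
      rw [strl, List.range_succ, List.map_append]
      exact PySem.List.pyGetD_neg_one_append_singleton _ _ _
    simp only [p2body, haget, hlast]
    rw [foldl_setD_append _ _ _ m (by omega), hSgetD]
    simp only [PySem.List.pySetD_natCast, PySem.List.pyGetD_natCast]
    rw [getD_set_self _ _ _ _ (by rw [hSlen]; omega), List.set_set, hSset]
    rw [List.range_succ, List.map_append]
    have hcnt : List.map (fun (_ : Int) => PySem.Int.toStr ((m:Int) + 1))
        (PySem.List.pyRange 0 (n - 2 * ((strl (m+1)).length : Int)) 1)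
        = List.replicate (n - 2*((m:Int)+1)).toNat (PySem.Int.toStr ((m:Int)+1)) := by
      rw [List.map_const']
      congr 1
      rw [PySem.List.length_pyRange_one]
      congr 1
      simp [strl]
    rw [hcnt]
    have hrow : rowMid n m = strl (m+1) ++ List.replicate (n - 2*((m:Int)+1)).toNat
        (PySem.Int.toStr ((m:Int)+1)) ++ (strl (m+1)).reverse := rfl
    have hM : M - m - 1 = M - (m+1) := by omega
    rw [hM]
    simp only [List.nil_append, List.map_cons, List.map_nil]
    rw [← hrow]
    simp

def rowB (n i : Int) : List String :=
  (PySem.List.pyRange 0 n 1).map (fun j =>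
    PySem.Int.toStr (min (min i j) (min (n - 1 - i) (n - 1 - j)) + 1))

theorem pySetD_neg_one_concat {α : Type} (xs : List α) (w v : α) :
    PySem.List.pySetD (xs ++ [w]) (-1) v = xs ++ [v] := by
  simp [PySem.List.pySetD, PySem.List.pySet?, PySem.List.pyIdx?]

-- rows strictly in the top half are ring rows
theorem rowB_lt (n : Int) (k : Nat) (hk : 2*(k:Int)+1 < n) : rowB n (k:Int) = rowMid n k := by
  have hseg1 : (PySem.List.pyRange 0 ((k:Int)+1) 1).map (fun j =>
      PySem.Int.toStr (min (min (k:Int) j) (min (n - 1 - (k:Int)) (n - 1 - j)) + 1)) = strl (k+1) := by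
    rw [PySem.List.pyRange_one, show ((k:Int)+1-0).toNat = k+1 from by omega, List.map_map, strl]
    refine List.map_congr_left (fun t ht => ?_)
    have : t < k + 1 := List.mem_range.mp ht
    simp only [Function.comp_apply]
    congr 1
    omega
  have hseg2 : (PySem.List.pyRange ((k:Int)+1) (n-1-(k:Int)) 1).map (fun j =>
      PySem.Int.toStr (min (min (k:Int) j) (min (n - 1 - (k:Int)) (n - 1 - j)) + 1))
      = List.replicate (n - 2*((k:Int)+1)).toNat (PySem.Int.toStr ((k:Int)+1)) := by
    have hval : ∀ j ∈ PySem.List.pyRange ((k:Int)+1) (n-1-(k:Int)) 1,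
        PySem.Int.toStr (min (min (k:Int) j) (min (n - 1 - (k:Int)) (n - 1 - j)) + 1)
          = PySem.Int.toStr ((k:Int)+1) := by
      intro j hj
      rw [PySem.List.mem_pyRange_one] at hj
      congr 1
      omega
    rw [List.map_congr_left hval, List.map_const', PySem.List.length_pyRange_one]
    congr 1
    omega
  have hseg3 : (PySem.List.pyRange (n-1-(k:Int)) n 1).map (fun j =>
      PySem.Int.toStr (min (min (k:Int) j) (min (n - 1 - (k:Int)) (n - 1 - j)) + 1))
      = (strl (k+1)).reverse := by
    rw [PySem.List.pyRange_one, show (n - (n-1-(k:Int))).toNat = k+1 from by omega, List.map_map]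
    rw [show (strl (k+1)).reverse
        = (List.range (k+1)).map (fun t => (fun s : Nat => PySem.Int.toStr ((s:Int)+1)) (k+1-1-t)) from
      (rev_map_range _ _).symm]
    refine List.map_congr_left (fun t ht => ?_)
    have htk : t < k + 1 := List.mem_range.mp ht
    simp only [Function.comp_apply]
    congr 1
    have h5 : ((k + 1 - 1 - t : Nat) : Int) = (k:Int) - t := by omega
    rw [h5]
    omega
  rw [rowB, PySem.List.pyRange_one_append 0 ((k:Int)+1) n (by omega) (by omega),
    PySem.List.pyRange_one_append ((k:Int)+1) (n-1-(k:Int)) n (by omega) (by omega),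
    List.map_append, List.map_append, hseg1, hseg2, hseg3, rowMid, List.append_assoc]

-- mirror symmetry of the closed-form row
theorem rowB_symm (n i : Int) : rowB n (n-1-i) = rowB n i := by
  rw [rowB, rowB]
  refine List.map_congr_left (fun j _ => ?_)
  congr 1
  omega

-- the middle row of an odd board
theorem rowB_mid (m : Nat) : rowB (2*(m:Int)+1) (m:Int) = strl (m+1) ++ (strl m).reverse := by
  set n : Int := 2*(m:Int)+1 with hn
  rw [rowB, PySem.List.pyRange_one_append 0 ((m:Int)+1) n (by omega) (by omega), List.map_append]
  congr 1
  · rw [PySem.List.pyRange_one, show ((m:Int)+1-0).toNat = m+1 from by omega, List.map_map, strl]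
    refine List.map_congr_left (fun t ht => ?_)
    have : t < m + 1 := List.mem_range.mp ht
    simp only [Function.comp_apply]
    congr 1
    omega
  · rw [PySem.List.pyRange_one, show (n - ((m:Int)+1)).toNat = m from by omega, List.map_map]
    rw [show (strl m).reverse
        = (List.range m).map (fun t => (fun s : Nat => PySem.Int.toStr ((s:Int)+1)) (m-1-t)) from
      (rev_map_range _ _).symm]
    refine List.map_congr_left (fun t ht => ?_)
    have htm : t < m := List.mem_range.mp ht
    simp only [Function.comp_apply]
    congr 1
    have : ((m - 1 - t : Nat) : Int) = (m:Int) - 1 - t := by omega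
    rw [this]
    omega

theorem rowsB_even (m : Nat) (hm : 1 ≤ m) :
    (PySem.List.pyRange 0 (2*(m:Int)) 1).map (rowB (2*(m:Int)))
      = (List.range m).map (rowMid (2*(m:Int)))
        ++ ((List.range m).map (rowMid (2*(m:Int)))).reverse := by
  set n : Int := 2*(m:Int) with hn
  rw [PySem.List.pyRange_one, show (n-0).toNat = m + m from by omega, List.range_add]
  simp only [List.map_append, List.map_map]
  congr 1
  · refine List.map_congr_left (fun t ht => ?_)
    have htm : t < m := List.mem_range.mp ht
    simp only [Function.comp_apply]
    rw [show (0 : Int) + (t:Int) = (t:Int) from by omega]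
    exact rowB_lt n t (by omega)
  · rw [show ((List.range m).map (rowMid n)).reverse
        = (List.range m).map (fun t => rowMid n (m-1-t)) from (rev_map_range _ _).symm]
    refine List.map_congr_left (fun t ht => ?_)
    have htm : t < m := List.mem_range.mp ht
    simp only [Function.comp_apply]
    have h1 : (0 : Int) + ((m+t:Nat):Int) = n - 1 - ((m-1-t:Nat):Int) := by omega
    rw [h1, rowB_symm]
    exact rowB_lt n (m-1-t) (by omega)

theorem rowsB_odd (m : Nat) (hm : 1 ≤ m) :
    (PySem.List.pyRange 0 (2*(m:Int)+1) 1).map (rowB (2*(m:Int)+1))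
      = (List.range m).map (rowMid (2*(m:Int)+1))
        ++ (strl (m+1) ++ (strl m).reverse)
          :: ((List.range m).map (rowMid (2*(m:Int)+1))).reverse := by
  set n : Int := 2*(m:Int)+1 with hn
  rw [PySem.List.pyRange_one, show (n-0).toNat = m + (m+1) from by omega, List.range_add]
  simp only [List.map_append, List.map_map]
  congr 1
  · refine List.map_congr_left (fun t ht => ?_)
    have htm : t < m := List.mem_range.mp ht
    simp only [Function.comp_apply]
    rw [show (0 : Int) + (t:Int) = (t:Int) from by omega]
    exact rowB_lt n t (by omega)
  · rw [List.range_succ_eq_map, List.map_cons, List.map_map]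
    congr 1
    · show rowB n (0 + ((m+0:Nat):Int)) = strl (m+1) ++ (strl m).reverse
      rw [show (0 : Int) + ((m+0:Nat):Int) = (m:Int) from by omega]
      exact rowB_mid m
    · rw [show ((List.range m).map (rowMid n)).reverse
          = (List.range m).map (fun t => rowMid n (m-1-t)) from (rev_map_range _ _).symm]
      refine List.map_congr_left (fun t ht => ?_)
      have htm : t < m := List.mem_range.mp ht
      simp only [Function.comp_apply]
      have h1 : (0 : Int) + ((m + Nat.succ t:Nat):Int) = n - 1 - ((m-1-t:Nat):Int) := by
        have : Nat.succ t = t + 1 := rfl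
        omega
      rw [h1, rowB_symm]
      exact rowB_lt n (m-1-t) (by omega)

theorem alt_eq_rows (n : Int) :
    make_dartboard_alt n = ((PySem.List.pyRange 0 n 1).map (rowB n)).map pyIntJoin := by
  rw [make_dartboard_alt, List.map_map]
  refine List.map_congr_left (fun i _ => ?_)
  simp only [Function.comp_apply, rowB]

theorem main_eq (n : Int) (hpre : 0 ≤ n ∨ PySem.Int.mod n 2 = 0) :
    make_dartboard n = make_dartboard_alt n := by
  rcases eq_or_ne n 1 with h1 | h1
  · subst h1; decide
  rcases le_or_gt n 0 with hle | hgt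
  · -- n ≤ 0 : both sides are []
    rcases eq_or_ne n 0 with h0 | h0
    · subst h0; decide
    · have heven : PySem.Int.mod n 2 = 0 := by
        rcases hpre with h | h
        · omega
        · exact h
      have hdvd : (2:Int) ∣ n := (PySem.Int.mod_eq_zero_iff_dvd n 2).mp heven
      have hfd : PySem.Int.floordiv n 2 + 2 ≤ 1 := by
        rw [PySem.Int.floordiv_eq_ediv_of_pos (by omega)]
        omega
      rw [make_dartboard]
      simp only [show (n == 1) = false from by simp [h1],
        show (PySem.Int.mod n 2 == 0) = true from by rw [heven]; rfl, Bool.false_eq_true,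
        if_false, if_true]
      rw [PySem.List.pyRange_one_eq_nil hfd]
      simp only [List.foldl_nil, PySem.List.slice_to_neg_one, List.dropLast_nil,
        List.length_nil, Nat.cast_zero]
      rw [PySem.List.pyRange_one_eq_nil (le_refl 0)]
      simp only [List.foldl_nil, List.reverse_nil, List.append_nil]
      rw [alt_eq_rows, PySem.List.pyRange_one_eq_nil hle]
      simp
  · -- n ≥ 2
    have hn2 : 2 ≤ n := by omega
    rw [make_dartboard]
    simp only [show (n == 1) = false from by simp [h1], Bool.false_eq_true, if_false]
    by_cases heven : PySem.Int.mod n 2 = 0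
    · -- even: n = 2m, m ≥ 1
      obtain ⟨t, ht⟩ := (PySem.Int.mod_eq_zero_iff_dvd n 2).mp heven
      have ht1 : 1 ≤ t := by omega
      set m : Nat := t.toNat with hm
      have hn : n = 2*(m:Int) := by omega
      have hm1 : 1 ≤ m := by omega
      have hfd : PySem.Int.floordiv n 2 = (m:Int) := by
        rw [PySem.Int.floordiv_eq_ediv_of_pos (by omega)]
        omega
      simp only [show (PySem.Int.mod n 2 == 0) = true from by rw [heven]; rfl, if_true]
      rw [hfd, phase1 m]
      rw [PySem.List.slice_to_neg_one, PySem.List.slice_to_neg_one, List.dropLast_concat,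
        show List.replicate (m+1) ([] : List String) = List.replicate m [] ++ [[]] from
          List.replicate_succ' .. , List.dropLast_concat]
      rw [show (((List.range m).map (fun k : Nat => strl (k+1))).length : Int) = ((m:Nat):Int) from by simp]
      rw [phase2 n m m m (le_refl m) (le_refl m)]
      simp only [Nat.sub_self, List.replicate_zero, List.append_nil]
      rw [PySem.List.foldl_append_singleton_eq_map, List.nil_append]
      rw [alt_eq_rows, hn, rowsB_even m hm1]
    · -- odd: n = 2m+1, m ≥ 1
      have hmod : PySem.Int.mod n 2 = 1 := by
        have h0 := PySem.Int.mod_nonneg n (b := 2) (by omega)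
        have h2 := PySem.Int.mod_lt n (b := 2) (by omega)
        omega
      have hdvd : (2:Int) ∣ (n - 1) := by
        have := PySem.Int.floordiv_mul_add_mod n 2
        exact ⟨PySem.Int.floordiv n 2, by omega⟩
      obtain ⟨t, ht⟩ := hdvd
      set m : Nat := t.toNat with hm
      have hn : n = 2*(m:Int)+1 := by omega
      have hm1 : 1 ≤ m := by omega
      have hfd : PySem.Int.floordiv n 2 = (m:Int) := by
        rw [PySem.Int.floordiv_eq_ediv_of_pos (by omega)]
        omega
      simp only [show (PySem.Int.mod n 2 == 0) = false from by rw [hmod]; rfl, Bool.false_eq_true,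
        if_false]
      rw [hfd, show ((m:Int) + 3) = ((m+1:Nat):Int) + 2 from by push_cast; ring, phase1 (m+1)]
      rw [PySem.List.slice_to_neg_one, PySem.List.slice_to_neg_one, List.dropLast_concat,
        show List.replicate (m+1+1) ([] : List String) = List.replicate (m+1) [] ++ [[]] from
          List.replicate_succ' .. , List.dropLast_concat]
      rw [phase2 n (m+1) m (m+1) (by omega) (by omega)]
      rw [show m + 1 - m = 1 from by omega, List.replicate_one]
      have ha1 : PySem.List.pyGetD ((List.range (m+1)).map (fun k : Nat => strl (k+1))) (-1) []
          = strl (m+1) := by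
        rw [List.range_succ, List.map_append]
        simpa using PySem.List.pyGetD_neg_one_append_singleton
          ((List.range m).map (fun k : Nat => strl (k+1))) (strl (m+1)) []
      have ha2 : PySem.List.pyGetD ((List.range (m+1)).map (fun k : Nat => strl (k+1))) (-2) []
          = strl m := by
        rw [PySem.List.pyGetD_neg_ofNat _ 2 _ (by omega) (by simp; omega)]
        simp only [List.length_map, List.length_range, List.getElem_map, List.getElem_range]
        congr 1
        omega
      rw [ha1, ha2, pySetD_neg_one_concat, PySem.List.slice_from_one, List.reverse_append]
      simp only [List.reverse_cons, List.reverse_nil, List.nil_append, List.singleton_append,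
        List.tail_cons]
      rw [PySem.List.foldl_append_singleton_eq_map, List.nil_append, alt_eq_rows, hn,
        rowsB_odd m hm1]
      simp [List.append_assoc]

-- ===== VERDICT (by name: the statement is the Claim_ definition above) =====
theorem make_dartboard_spec : Claim_equal_make_dartboard := by
  intro n _ hpre
  unfold Spec_make_dartboard
  exact main_eq n hpre
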